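-- pv_equiv track=rewrite | github.com/HungNguyen20/DEFT | SADA/SADA.py | find_all_paths_exclude_direct
-- ===== SOURCE A (Python) =====
-- def find_all_paths_exclude_direct(v1, v2, edge_list):
--     from collections import defaultdict
--
--     # Build adjacency list
--     graph=defaultdict(list)
--     for u, v in edge_list:
--         if not (u ==v1 and v ==v2):  # Exclude direct edge
--             graph[u].append(v)
--
--     all_paths=[]
--
--     def dfs(current, path, visited):
--         if current ==v2:
--             all_paths.append(path[:])
--             return
--         visited.add(current)
--         for neighbor in graph[current]:
--             if neighbor not in visited:
--                 path.append(neighbor)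
--                 dfs(neighbor, path, visited)
--                 path.pop()
--         visited.remove(current)
--
--     dfs(v1, [v1], set())
--     return all_paths
-- ===== SOURCE B (Python) =====
-- def find_all_paths_exclude_direct(v1, v2, edge_list):
--     from collections import defaultdict
--
--     # Build adjacency list, skipping the direct edge
--     graph = defaultdict(list)
--     for u, v in edge_list:
--         if not (u == v1 and v == v2):
--             graph[u].append(v)
--
--     # Iterative DFS over an explicit stack of partial paths (no recursion,
--     # no separate visited set: a path is simple, so 'in path' is the test).
--     all_paths = []
--     stack = [[v1]]
--     while stack:
--         path = stack.pop()
--         current = path[-1]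
--         if current == v2:
--             all_paths.append(path)
--             continue
--         for neighbor in reversed(graph[current]):
--             if neighbor not in path:
--                 stack.append(path + [neighbor])
--     return all_paths
-- ===== Notes on version B (the rewrite author's own statement) =====
-- stated objective: alternative
-- what changed: The recursive DFS with a mutable visited set and shared path buffer is replaced by an iterative worklist loop over an explicit stack of partial paths (pushed in reversed neighbor order, simplicity tested by 'not in path'), eliminating recursion and the visited set entirely.
import Mathlib
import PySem

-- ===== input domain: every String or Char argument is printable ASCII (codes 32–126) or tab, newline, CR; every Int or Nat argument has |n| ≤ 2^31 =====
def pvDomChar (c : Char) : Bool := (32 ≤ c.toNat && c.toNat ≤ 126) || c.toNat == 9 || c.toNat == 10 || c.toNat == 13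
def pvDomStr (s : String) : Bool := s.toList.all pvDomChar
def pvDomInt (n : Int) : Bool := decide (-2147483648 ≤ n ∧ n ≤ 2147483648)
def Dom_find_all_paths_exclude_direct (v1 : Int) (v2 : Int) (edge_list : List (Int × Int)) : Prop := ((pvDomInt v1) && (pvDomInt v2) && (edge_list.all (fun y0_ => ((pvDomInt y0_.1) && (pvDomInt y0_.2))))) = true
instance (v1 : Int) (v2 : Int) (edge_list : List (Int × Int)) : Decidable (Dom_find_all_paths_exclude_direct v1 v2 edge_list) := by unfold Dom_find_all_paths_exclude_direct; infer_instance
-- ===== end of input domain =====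

-- B replaces A's recursive DFS (mutable visited set + shared path buffer) by an iterative
-- worklist loop over an explicit stack of partial paths; same return value (alternative, not faster).

-- ---- shared helper: both Pythons build the identical defaultdict adjacency list ----
def pvGraph (v1 v2 : Int) (el : List (Int × Int)) : PySem.Dict Int (List Int) :=
  el.foldl (fun g e => if e.1 = v1 ∧ e.2 = v2 then g else g.modify e.1 [] (fun l => l ++ [e.2]))
    PySem.Dict.empty

-- all vertices that can ever appear (v1 plus every edge endpoint); used only for termination
def pvNodes (v1 : Int) (el : List (Int × Int)) : List Int :=
  v1 :: el.flatMap (fun e => [e.1, e.2])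

-- closed form of an adjacency-list lookup (used by the termination arguments)
theorem pvGraph_getD_aux (v1 v2 k : Int) :
    ∀ (el : List (Int × Int)) (d : PySem.Dict Int (List Int)),
      (el.foldl (fun g e => if e.1 = v1 ∧ e.2 = v2 then g else g.modify e.1 [] (fun l => l ++ [e.2])) d).getD k []
        = d.getD k [] ++ ((el.filter (fun e => decide (e.1 = k) && !(decide (e.1 = v1) && decide (e.2 = v2)))).map (·.2)) := by
  intro el
  induction el with
  | nil => simp
  | cons e rest ih =>
    intro d
    simp only [List.foldl_cons, List.filter_cons]
    by_cases hsk : e.1 = v1 ∧ e.2 = v2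
    · simp [hsk, ih]
    · by_cases hk : e.1 = k
      · have hcond : (decide (e.1 = k) && !(decide (e.1 = v1) && decide (e.2 = v2))) = true := by
          simp [hk]
          rw [← hk]
          exact not_and_or.mp hsk
        simp only [if_neg hsk, hcond, ih, List.map_cons]
        subst hk
        rw [PySem.Dict.getD_modify_self]
        simp
      · have hcond : (decide (e.1 = k) && !(decide (e.1 = v1) && decide (e.2 = v2))) = false := by
          simp [hk]
        simp only [if_neg hsk, hcond, Bool.false_eq_true, if_false, ih]
        rw [PySem.Dict.getD_modify_of_ne]
        exact Ne.symm hk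

theorem pvGraph_getD (v1 v2 k : Int) (el : List (Int × Int)) :
    (pvGraph v1 v2 el).getD k []
      = (el.filter (fun e => decide (e.1 = k) && !(decide (e.1 = v1) && decide (e.2 = v2)))).map (·.2) := by
  have := pvGraph_getD_aux v1 v2 k el PySem.Dict.empty
  simpa [pvGraph] using this

theorem pvGraph_mem_nodes {v1 v2 k x : Int} {el : List (Int × Int)}
    (h : x ∈ (pvGraph v1 v2 el).getD k []) : x ∈ pvNodes v1 el := by
  rw [pvGraph_getD] at h
  rcases List.mem_map.1 h with ⟨e, he, rfl⟩
  have : e ∈ el := List.mem_of_mem_filter he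
  simp only [pvNodes, List.mem_cons, List.mem_flatMap]
  right; exact ⟨e, this, by simp⟩

theorem pvGraph_getD_nil {v1 v2 k : Int} {el : List (Int × Int)}
    (h : k ∉ pvNodes v1 el) : (pvGraph v1 v2 el).getD k [] = [] := by
  rw [pvGraph_getD]
  rw [List.eq_nil_iff_forall_not_mem]
  intro x hx
  rcases List.mem_map.1 hx with ⟨e, he, rfl⟩
  have h1 : e ∈ el := List.mem_of_mem_filter he
  have h2 : e.1 = k := by
    have := List.of_mem_filter he
    simpa using (Bool.and_eq_true_iff.1 this).1
  apply h
  simp only [pvNodes, List.mem_cons, List.mem_flatMap]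
  right; exact ⟨e, h1, by simp [h2]⟩

theorem pvGraph_getD_len (v1 v2 k : Int) (el : List (Int × Int)) :
    ((pvGraph v1 v2 el).getD k []).length ≤ el.length := by
  rw [pvGraph_getD]
  simpa using List.length_filter_le _ el

-- generic weak/strict decrease of the 'unvisited' count, used by both termination measures
theorem pvFilter_append_le (N p : List Int) (n : Int) :
    ((N.filter (fun x => decide (x ∉ p ++ [n]))).length) ≤ (N.filter (fun x => decide (x ∉ p))).length := by
  have h : ∀ x ∈ N, (fun x => decide (x ∉ p ++ [n])) x = true → (fun x => decide (x ∉ p)) x = true := by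
    intro x _ hx
    simp only [decide_eq_true_eq, List.mem_append] at *
    tauto
  have := List.countP_mono_left h
  rwa [List.countP_eq_length_filter, List.countP_eq_length_filter] at this

theorem pvFilter_append_lt {N p : List Int} {n : Int} (hn : n ∈ N) (hp : n ∉ p) :
    ((N.filter (fun x => decide (x ∉ p ++ [n]))).length) < (N.filter (fun x => decide (x ∉ p))).length := by
  rcases List.append_of_mem hn with ⟨l1, l2, rfl⟩
  have a1 := pvFilter_append_le l1 p n
  have a2 := pvFilter_append_le l2 p n
  have h1 : (decide (n ∉ p ++ [n])) = false := by simp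
  have h2 : (decide (n ∉ p)) = true := by simpa using hp
  simp only [List.filter_append, List.length_append, List.filter_cons, h1, h2,
    Bool.false_eq_true, if_false, eq_self_iff_true, if_true, List.length_cons]
  omega

-- ===== PORT A =====
-- A's recursive dfs with the inner recursive call's body inlined into the neighbor loop
-- (one unfolding of Python's dfs; visited/path are net-unchanged by each loop iteration,
-- so they are passed functionally); the result list is all_paths' append order.
def pvDfsA (v1 v2 : Int) (el : List (Int × Int)) (nbrs : List Int) (path : List Int)
    (visited : PySem.Set Int) : List (List Int) :=
  match nbrs with
  | [] => []
  | n :: rest =>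
    (if n ∈ visited then []
     else if n = v2 then [path ++ [n]]
     else pvDfsA v1 v2 el ((pvGraph v1 v2 el).getD n []) (path ++ [n]) (PySem.Set.add visited n))
    ++ pvDfsA v1 v2 el rest path visited
termination_by ((((pvNodes v1 el).filter (fun x => decide (x ∉ visited))).length), nbrs.length)
decreasing_by
  · by_cases hn : n ∈ pvNodes v1 el
    · apply Prod.Lex.left
      rw [PySem.Set.add_of_not_mem (by assumption)]
      exact pvFilter_append_lt hn (by assumption)
    · have hg : (pvGraph v1 v2 el).getD n [] = [] := pvGraph_getD_nil hn
      have he : ((pvNodes v1 el).filter (fun x => decide (x ∉ PySem.Set.add visited n))).length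
          = ((pvNodes v1 el).filter (fun x => decide (x ∉ visited))).length := by
        rw [PySem.Set.add_of_not_mem (by assumption)]
        congr 1
        apply List.filter_congr
        intro x hx
        have : x ≠ n := fun h => hn (h ▸ hx)
        simp [List.mem_append, this]
      rw [hg, he]
      apply Prod.Lex.right
      simp
  · apply Prod.Lex.right
    simp

def find_all_paths_exclude_direct (v1 : Int) (v2 : Int) (edge_list : List (Int × Int)) :
    List (List Int) :=
  -- dfs(v1, [v1], set()): append [v1] if v1 == v2, else loop over graph[v1] with visited = {v1}
  if v1 = v2 then [[v1]]
  else pvDfsA v1 v2 edge_list ((pvGraph v1 v2 edge_list).getD v1 []) [v1]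
    (PySem.Set.add PySem.Set.empty v1)

-- ===== PORT B =====
-- termination measure for the worklist loop: Σ over stacked paths of (|edges|+2)^(unvisited nodes)
def pvWeight (v1 : Int) (el : List (Int × Int)) (p : List Int) : Nat :=
  (el.length + 2) ^ (((pvNodes v1 el).filter (fun x => decide (x ∉ p))).length)

def pvMeasure (v1 : Int) (el : List (Int × Int)) (stack : List (List Int)) : Nat :=
  (stack.map (pvWeight v1 el)).sum

theorem pvWeight_pos (v1 : Int) (el : List (Int × Int)) (p : List Int) : 0 < pvWeight v1 el p :=
  Nat.pow_pos (by omega)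

-- pushing the reversed neighbor list one by one onto the head = filtered children in front
theorem pvPushEq (p : List Int) (rest : List (List Int)) :
    ∀ (l : List Int),
      l.reverse.foldl (fun st n => if n ∈ p then st else (p ++ [n]) :: st) rest
        = ((l.filter (fun n => decide (n ∉ p))).map (fun n => p ++ [n])) ++ rest := by
  intro l
  rw [List.foldl_reverse]
  induction l with
  | nil => simp
  | cons n rest' ih =>
    simp only [List.foldr_cons, List.filter_cons, ih]
    by_cases hn : n ∈ p
    · simp [hn]
    · simp [hn]

theorem pvMeasure_expand_lt (v1 v2 cur : Int) (el : List (Int × Int)) (p : List Int)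
    (rest : List (List Int)) :
    pvMeasure v1 el
        (((pvGraph v1 v2 el).getD cur []).reverse.foldl
          (fun st n => if n ∈ p then st else (p ++ [n]) :: st) rest)
      < pvMeasure v1 el (p :: rest) := by
  rw [pvPushEq]
  set l := (pvGraph v1 v2 el).getD cur [] with hl
  set fl := l.filter (fun n => decide (n ∉ p)) with hfl
  have hsum : pvMeasure v1 el ((fl.map (fun n => p ++ [n])) ++ rest)
      = ((fl.map (fun n => p ++ [n])).map (pvWeight v1 el)).sum + pvMeasure v1 el rest := by
    simp [pvMeasure]
  have hhead : pvMeasure v1 el (p :: rest) = pvWeight v1 el p + pvMeasure v1 el rest := by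
    simp [pvMeasure]
  rw [hsum, hhead]
  have key : ((fl.map (fun n => p ++ [n])).map (pvWeight v1 el)).sum < pvWeight v1 el p := by
    rcases List.eq_nil_or_concat fl with hnil | ⟨_, _, hne⟩
    · rw [hnil]; simpa using pvWeight_pos v1 el p
    · have hne' : fl ≠ [] := by rw [hne]; simp
      rcases List.exists_mem_of_ne_nil fl hne' with ⟨n0, hn0⟩
      have hn0l : n0 ∈ l := List.mem_of_mem_filter hn0
      have hn0p : n0 ∉ p := by simpa using List.of_mem_filter hn0
      have hn0N : n0 ∈ pvNodes v1 el := pvGraph_mem_nodes (hl ▸ hn0l)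
      set k := ((pvNodes v1 el).filter (fun x => decide (x ∉ p))).length with hk
      have hk1 : 1 ≤ k := by
        have := pvFilter_append_lt (p := p) hn0N hn0p
        omega
      have hbound : ∀ w ∈ (fl.map (fun n => p ++ [n])).map (pvWeight v1 el),
          w ≤ (el.length + 2) ^ (k - 1) := by
        intro w hw
        rcases List.mem_map.1 hw with ⟨q, hq, rfl⟩
        rcases List.mem_map.1 hq with ⟨n, hn, rfl⟩
        have hnl : n ∈ l := List.mem_of_mem_filter hn
        have hnp : n ∉ p := by simpa using List.of_mem_filter hn
        have hnN : n ∈ pvNodes v1 el := pvGraph_mem_nodes (hl ▸ hnl)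
        have hlt := pvFilter_append_lt (p := p) hnN hnp
        unfold pvWeight
        exact Nat.pow_le_pow_right (by omega) (by omega)
      have hlen : ((fl.map (fun n => p ++ [n])).map (pvWeight v1 el)).length ≤ el.length := by
        simp only [List.length_map]
        calc fl.length ≤ l.length := List.length_filter_le _ _
          _ ≤ el.length := pvGraph_getD_len v1 v2 cur el
      have hs := List.sum_le_card_nsmul _ _ hbound
      have hx : 0 < (el.length + 2) ^ (k - 1) := Nat.pow_pos (by omega)
      have hmain : ((fl.map (fun n => p ++ [n])).map (pvWeight v1 el)).sum
          ≤ el.length * (el.length + 2) ^ (k - 1) := by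
        calc ((fl.map (fun n => p ++ [n])).map (pvWeight v1 el)).sum
            ≤ ((fl.map (fun n => p ++ [n])).map (pvWeight v1 el)).length • ((el.length + 2) ^ (k - 1)) := hs
          _ = ((fl.map (fun n => p ++ [n])).map (pvWeight v1 el)).length * ((el.length + 2) ^ (k - 1)) := by
              simp [smul_eq_mul]
          _ ≤ el.length * (el.length + 2) ^ (k - 1) := Nat.mul_le_mul_right _ hlen
      have hpow : pvWeight v1 el p = (el.length + 2) ^ k := rfl
      have hsplit : (el.length + 2) ^ k = (el.length + 2) * (el.length + 2) ^ (k - 1) := by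
        conv_lhs => rw [show k = (k - 1) + 1 by omega]
        ring
      rw [hpow, hsplit]
      have hstep : el.length * (el.length + 2) ^ (k - 1)
          < (el.length + 2) * (el.length + 2) ^ (k - 1) := by
        exact Nat.mul_lt_mul_of_lt_of_le (by omega) (le_refl _) hx
      omega
  omega

-- the worklist loop of Source B: stack top at the list head; path[-1] is getLast?
-- (the 'none' branch is unreachable: only nonempty paths are ever pushed)
def pvLoopB (v1 v2 : Int) (el : List (Int × Int)) (stack : List (List Int)) : List (List Int) :=
  match stack with
  | [] => []
  | p :: rest =>
    (p.getLast?).elim (pvLoopB v1 v2 el rest)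
      (fun cur =>
        if cur = v2 then p :: pvLoopB v1 v2 el rest
        else
          pvLoopB v1 v2 el
            (((pvGraph v1 v2 el).getD cur []).reverse.foldl
              (fun st n => if n ∈ p then st else (p ++ [n]) :: st) rest))
termination_by pvMeasure v1 el stack
decreasing_by
  all_goals first
  | exact pvMeasure_expand_lt v1 v2 cur el p rest
  | (have := pvWeight_pos v1 el p; simp [pvMeasure]; omega)

def find_all_paths_exclude_direct_alt (v1 : Int) (v2 : Int) (edge_list : List (Int × Int)) :
    List (List Int) :=
  pvLoopB v1 v2 edge_list [[v1]]

-- ===== PRECONDITION & SPEC =====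
def Spec_find_all_paths_exclude_direct (v1 : Int) (v2 : Int) (edge_list : List (Int × Int)) (out : List (List Int)) : Prop := out = find_all_paths_exclude_direct_alt v1 v2 edge_list
instance (v1 : Int) (v2 : Int) (edge_list : List (Int × Int)) (out : List (List Int)) : Decidable (Spec_find_all_paths_exclude_direct v1 v2 edge_list out) := by unfold Spec_find_all_paths_exclude_direct; infer_instance

-- ===== CLAIM (what is proved, stated in full; the proofs are below) =====
def Claim_equal_find_all_paths_exclude_direct : Prop := ∀ (v1 : Int) (v2 : Int) (edge_list : List (Int × Int)), Dom_find_all_paths_exclude_direct v1 v2 edge_list → Spec_find_all_paths_exclude_direct v1 v2 edge_list (find_all_paths_exclude_direct v1 v2 edge_list)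

-- ===== LEMMAS AND PROOFS =====

-- unfolding lemmas for the worklist loop
theorem pvLoopB_nil (v1 v2 : Int) (el : List (Int × Int)) : pvLoopB v1 v2 el [] = [] := by
  rw [pvLoopB.eq_def]

theorem pvLoopB_cons_none (v1 v2 : Int) (el : List (Int × Int)) {p : List Int}
    (rest : List (List Int)) (hlast : p.getLast? = none) :
    pvLoopB v1 v2 el (p :: rest) = pvLoopB v1 v2 el rest := by
  rw [pvLoopB.eq_def]
  simp only [hlast, Option.elim_none]

theorem pvLoopB_cons (v1 v2 : Int) (el : List (Int × Int)) {p : List Int} {cur : Int}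
    (rest : List (List Int)) (hlast : p.getLast? = some cur) :
    pvLoopB v1 v2 el (p :: rest)
      = if cur = v2 then p :: pvLoopB v1 v2 el rest
        else pvLoopB v1 v2 el
          (((pvGraph v1 v2 el).getD cur []).reverse.foldl
            (fun st n => if n ∈ p then st else (p ++ [n]) :: st) rest) := by
  rw [pvLoopB.eq_def]
  simp only [hlast, Option.elim_some]

-- what one stacked path contributes to B's output: exactly A's dfs from that path
def pvExpand (v1 v2 : Int) (el : List (Int × Int)) (p : List Int) : List (List Int) :=
  (p.getLast?).elim []
    (fun cur =>
      if cur = v2 then [p]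
      else pvDfsA v1 v2 el ((pvGraph v1 v2 el).getD cur []) p (PySem.Set.ofList p))

theorem pvFlatExpand (v1 v2 : Int) (el : List (Int × Int)) (p : List Int) :
    ∀ (nbrs : List Int),
      ((nbrs.filter (fun n => decide (n ∉ p))).map (fun n => p ++ [n])).flatMap (pvExpand v1 v2 el)
        = pvDfsA v1 v2 el nbrs p (PySem.Set.ofList p) := by
  intro nbrs
  induction nbrs with
  | nil => simp [pvDfsA]
  | cons n rest ih =>
    rw [pvDfsA]
    by_cases hn : n ∈ p
    · have hmem : n ∈ PySem.Set.ofList p := by simpa [PySem.Set.mem_ofList] using hn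
      rw [if_pos hmem]
      have hd : (decide (n ∉ p)) = false := by simpa using hn
      simp only [List.filter_cons, hd, Bool.false_eq_true, if_false, List.nil_append]
      exact ih
    · have hmem : n ∉ PySem.Set.ofList p := by simpa [PySem.Set.mem_ofList] using hn
      rw [if_neg hmem]
      have hd : (decide (n ∉ p)) = true := by simpa using hn
      simp only [List.filter_cons, hd, eq_self_iff_true, if_true, List.map_cons, List.flatMap_cons]
      rw [ih]
      congr 1
      rw [pvExpand, List.getLast?_concat]
      simp only [Option.elim_some]
      by_cases hv : n = v2
      · rw [if_pos hv, if_pos hv]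
      · rw [if_neg hv, if_neg hv, PySem.Set.ofList_append_singleton]

theorem pvLoop_eq_flatMap (v1 v2 : Int) (el : List (Int × Int)) :
    ∀ (m : Nat) (stack : List (List Int)), pvMeasure v1 el stack ≤ m →
      pvLoopB v1 v2 el stack = stack.flatMap (pvExpand v1 v2 el) := by
  intro m
  induction m with
  | zero =>
    intro stack hm
    match stack with
    | [] => simp [pvLoopB_nil]
    | p :: rest =>
      exfalso
      have := pvWeight_pos v1 el p
      simp [pvMeasure] at hm
      omega
  | succ m ih =>
    intro stack hm
    match stack with
    | [] => simp [pvLoopB_nil]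
    | p :: rest =>
      have hsplit : pvMeasure v1 el (p :: rest) = pvWeight v1 el p + pvMeasure v1 el rest := by
        simp [pvMeasure]
      have hwp := pvWeight_pos v1 el p
      have hrest : pvMeasure v1 el rest ≤ m := by omega
      match hlast : p.getLast? with
      | none =>
        rw [pvLoopB_cons_none v1 v2 el rest hlast]
        simp only [List.flatMap_cons]
        rw [pvExpand, hlast]
        simpa using ih rest hrest
      | some cur =>
        rw [pvLoopB_cons v1 v2 el rest hlast]
        by_cases hv : cur = v2
        · rw [if_pos hv]
          simp only [List.flatMap_cons]
          rw [pvExpand, hlast, ih rest hrest]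
          simp [hv]
        · rw [if_neg hv]
          have hlt := pvMeasure_expand_lt v1 v2 cur el p rest
          have hm' : pvMeasure v1 el
              (((pvGraph v1 v2 el).getD cur []).reverse.foldl
                (fun st n => if n ∈ p then st else (p ++ [n]) :: st) rest) ≤ m := by
            omega
          rw [ih _ hm', pvPushEq]
          simp only [List.flatMap_append, List.flatMap_cons]
          rw [pvFlatExpand, pvExpand, hlast]
          simp only [Option.elim_some]
          rw [if_neg hv]

-- ===== VERDICT (by name: the statement is the Claim_ definition above) =====
theorem find_all_paths_exclude_direct_spec : Claim_equal_find_all_paths_exclude_direct := by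
  intro v1 v2 el _
  unfold Spec_find_all_paths_exclude_direct find_all_paths_exclude_direct find_all_paths_exclude_direct_alt
  rw [pvLoop_eq_flatMap v1 v2 el (pvMeasure v1 el [[v1]]) [[v1]] (le_refl _)]
  simp only [List.flatMap_cons, List.flatMap_nil, List.append_nil]
  rw [pvExpand]
  have hlast : ([v1] : List Int).getLast? = some v1 := rfl
  rw [hlast]
  simp only [Option.elim_some]
  by_cases hv : v1 = v2
  · rw [if_pos hv, if_pos hv]
  · rw [if_neg hv, if_neg hv]
    rfl
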